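-- pv_equiv track=rewrite | github.com/Interactive-Context-Lab/Medical-Speech-Recognition | preprocess/E2CandC2E.py | sep_seq
-- ===== SOURCE A (Python) =====
-- def sep_seq(seq):
--     """
--     return a list of sentence
--     e.g. "Ada{asd}qe{qs}a" -> [A,s,a,{asd},q,e,{qs},a]
--
--     :param seq: input sentence
--     :return: list of sentence
--     """
--     temp = []
--     is_eng_word = False
--     word_temp = ""
--     for c in seq:
--         word_temp = word_temp + c
--         if c == "{" or c == "}" or c == "<" or c == ">":
--             is_eng_word = not is_eng_word
--             if not is_eng_word:
--                 temp.append(word_temp)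
--                 word_temp = ""
--         elif not is_eng_word:
--             temp.append(word_temp)
--             word_temp = ""
--     return temp
-- ===== SOURCE B (Python) =====
-- def sep_seq(seq):
--     # Region walk: chars outside bracket groups are emitted one by one via the
--     # outer loop; at an opening bracket an inner scan finds the next bracket
--     # and the whole slice is emitted as one token; a trailing unclosed group
--     # is dropped.
--     brackets = "{}<>"
--     out = []
--     i = 0
--     n = len(seq)
--     while i < n:
--         if seq[i] in brackets:
--             j = i + 1
--             while j < n and seq[j] not in brackets:
--                 j += 1
--             if j == n:
--                 break
--             out.append(seq[i:j + 1])
--             i = j + 1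
--         else:
--             out.append(seq[i])
--             i += 1
--     return out
-- ===== Notes on version B (the rewrite author's own statement) =====
-- stated objective: alternative
-- what changed: Replaces A's character-by-character state machine (toggle flag + growing word buffer) with an index/region walk: single chars are emitted directly and at each bracket an inner scan finds the group's end so the whole slice is emitted at once.
import Mathlib
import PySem

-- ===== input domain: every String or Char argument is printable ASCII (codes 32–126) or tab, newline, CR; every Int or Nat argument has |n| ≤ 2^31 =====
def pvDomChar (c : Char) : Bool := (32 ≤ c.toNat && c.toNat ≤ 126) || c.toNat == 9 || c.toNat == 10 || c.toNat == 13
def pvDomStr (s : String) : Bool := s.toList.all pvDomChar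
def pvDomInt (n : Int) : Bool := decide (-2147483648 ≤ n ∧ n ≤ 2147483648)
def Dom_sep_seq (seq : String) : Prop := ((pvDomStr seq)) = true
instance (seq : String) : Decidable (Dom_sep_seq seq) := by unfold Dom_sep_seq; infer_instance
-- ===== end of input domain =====

-- B replaces A's char-by-char toggle state machine with a region walk (emit
-- single chars; at a bracket, scan for the group's end and emit the slice);
-- objective: alternative decomposition, same O(n) cost.


-- ===== PORT A =====
-- A's loop state: (temp, is_eng_word, word_temp); word_temp kept as List Char,
-- turned into a String exactly when A appends it to temp.
def sepStepA (st : List String × Bool × List Char) (c : Char) :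
    List String × Bool × List Char :=
  let w := st.2.2 ++ [c]
  if c == '{' || c == '}' || c == '<' || c == '>' then
    if st.2.1 then (st.1 ++ [String.ofList w], false, [])
    else (st.1, true, w)
  else
    if st.2.1 then (st.1, true, w)
    else (st.1 ++ [String.ofList w], false, [])

def sep_seq (seq : String) : List String :=
  (seq.toList.foldl sepStepA ([], false, [])).1

-- ===== PORT B =====
def isBracket (c : Char) : Bool := c == '{' || c == '}' || c == '<' || c == '>'

-- inner scan of Source B: split off everything up to and including the next bracket
def splitFirstBr : List Char → Option (List Char × Char × List Char)
  | [] => none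
  | c :: cs =>
    if isBracket c then some ([], c, cs)
    else
      match splitFirstBr cs with
      | none => none
      | some (m, d, r) => some (c :: m, d, r)

theorem splitFirstBr_length {cs : List Char} {m : List Char} {d : Char}
    {r : List Char} (h : splitFirstBr cs = some (m, d, r)) :
    r.length < cs.length := by
  induction cs generalizing m d r with
  | nil => simp [splitFirstBr] at h
  | cons c cs ih =>
    by_cases hb : isBracket c
    · simp [splitFirstBr, hb] at h
      obtain ⟨_, _, h3⟩ := h
      subst h3; simp
    · simp [splitFirstBr, hb] at h
      cases hs : splitFirstBr cs with
      | none => simp [hs] at h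
      | some t =>
        obtain ⟨m', d', r'⟩ := t
        simp [hs] at h
        obtain ⟨_, _, h3⟩ := h
        subst h3
        exact Nat.lt_trans (ih hs) (by simp)

-- outer loop of Source B as recursion on the remaining characters
def sepRegions : List Char → List String
  | [] => []
  | c :: cs =>
    if isBracket c then
      match h : splitFirstBr cs with
      | none => []
      | some (m, d, r) => String.ofList (c :: (m ++ [d])) :: sepRegions r
    else
      String.ofList [c] :: sepRegions cs
termination_by cs => cs.length
decreasing_by
  · exact Nat.lt_trans (splitFirstBr_length h) (by simp)
  · simp

def sep_seq_alt (seq : String) : List String := sepRegions seq.toList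

-- ===== PRECONDITION & SPEC =====
def Spec_sep_seq (seq : String) (out : List String) : Prop := out = sep_seq_alt seq
instance (seq : String) (out : List String) : Decidable (Spec_sep_seq seq out) := by unfold Spec_sep_seq; infer_instance

-- ===== CLAIM (what is proved, stated in full; the proofs are below) =====
def Claim_equal_sep_seq : Prop := ∀ (seq : String), Dom_sep_seq seq → Spec_sep_seq seq (sep_seq seq)

-- ===== LEMMAS AND PROOFS =====
-- Invariant for A's fold, proved simultaneously for both values of the flag.
theorem sep_fold_key (cs : List Char) :
    (∀ temp : List String,
        (cs.foldl sepStepA (temp, false, ([] : List Char))).1 = temp ++ sepRegions cs) ∧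
    (∀ (temp : List String) (w : List Char),
        (cs.foldl sepStepA (temp, true, w)).1 =
          match splitFirstBr cs with
          | none => temp
          | some (m, d, r) => temp ++ String.ofList (w ++ m ++ [d]) :: sepRegions r) := by
  induction cs with
  | nil => refine ⟨fun temp => by simp [sepRegions], fun temp w => by simp [splitFirstBr]⟩
  | cons c cs ih =>
    constructor
    · intro temp
      by_cases hb : isBracket c
      · have hstep : sepStepA (temp, false, ([] : List Char)) c = (temp, true, [c]) := by
          simp [sepStepA, isBracket] at hb ⊢; tauto
        rw [List.foldl_cons, hstep, ih.2]
        cases hs : splitFirstBr cs with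
        | none =>
          rw [sepRegions]
          simp only [hb, reduceIte]
          split <;> simp_all
        | some t =>
          obtain ⟨m, d, r⟩ := t
          rw [sepRegions]
          simp only [hb, reduceIte]
          split <;> simp_all
      · have hstep : sepStepA (temp, false, ([] : List Char)) c
            = (temp ++ [String.ofList [c]], false, []) := by
          simp [sepStepA, isBracket] at hb ⊢; tauto
        rw [List.foldl_cons, hstep, ih.1]
        simp [sepRegions, hb]
    · intro temp w
      by_cases hb : isBracket c
      · have hstep : sepStepA (temp, true, w) c
            = (temp ++ [String.ofList (w ++ [c])], false, []) := by
          simp [sepStepA, isBracket] at hb ⊢; tauto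
        rw [List.foldl_cons, hstep, ih.1]
        have hsf : splitFirstBr (c :: cs) = some ([], c, cs) := by
          simp [splitFirstBr, hb]
        simp [hsf]
      · have hstep : sepStepA (temp, true, w) c = (temp, true, w ++ [c]) := by
          simp [sepStepA, isBracket] at hb ⊢; tauto
        rw [List.foldl_cons, hstep, ih.2]
        cases hs : splitFirstBr cs with
        | none => simp [splitFirstBr, hb, hs]
        | some t =>
          obtain ⟨m, d, r⟩ := t
          simp [splitFirstBr, hb, hs]

-- ===== VERDICT (by name: the statement is the Claim_ definition above) =====
theorem sep_seq_spec : Claim_equal_sep_seq := by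
  intro seq _
  unfold Spec_sep_seq sep_seq sep_seq_alt
  simpa using (sep_fold_key seq.toList).1 []
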